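-- pv_equiv track=rewrite | github.com/ayannotfound/ANPR | util.py | _apply_positional_correction
-- ===== SOURCE A (Python) =====
-- DIGIT_MAP = {
--     'O': '0', 'I': '1', 'L': '1', 'Z': '2',
--     'S': '5', 'G': '6', 'B': '8', 'A': '4',
--     'J': '7', 'T': '7', 'D': '0', 'Q': '0'
-- }
--
-- LETTER_MAP = {
--     '0': 'O', '1': 'I', '2': 'Z',
--     '5': 'S', '6': 'G', '8': 'B',
--     '4': 'A', '7': 'T'
-- }
--
-- PLATE_TEMPLATES = [
--     'LLDDLLDDDD',   # Standard 10-char: KA03HW9382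
--     'LLDDLDDDD',    # Short 9-char:     DL8C12345 → actually DL08C1234
--     'LLDDLLLDDDD',  # Extended series:  MH12ABC1234
--     'LLDDDDDD',     # Old commercial:   UP141234
--     'DDLLDDDDLL',   # Bharat (BH):      21BH2345AA
-- ]
--
-- def _apply_positional_correction(text: str) -> str:
--     """
--     Try each Indian plate template. For the best-matching template,
--     swap characters using DIGIT_MAP / LETTER_MAP at each position.
--     Returns the corrected string (may still fail regex validation).
--     """
--     if not text:
--         return text
--
--     best_corrected = text
--     best_match_score = -1
--
--     for template in PLATE_TEMPLATES:
--         if len(template) != len(text):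
--             continue
--
--         corrected = list(text)
--         match_score = 0
--
--         for i, expected in enumerate(template):
--             ch = corrected[i]
--             if expected == 'L':
--                 # Position expects a letter
--                 if ch.isalpha():
--                     match_score += 1
--                 elif ch in LETTER_MAP:
--                     corrected[i] = LETTER_MAP[ch]
--                     match_score += 1
--             elif expected == 'D':
--                 # Position expects a digit
--                 if ch.isdigit():
--                     match_score += 1
--                 elif ch in DIGIT_MAP:
--                     corrected[i] = DIGIT_MAP[ch]
--                     match_score += 1
--
--         if match_score > best_match_score:
--             best_match_score = match_score
--             best_corrected = ''.join(corrected)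
--
--     return best_corrected
-- ===== SOURCE B (Python) =====
-- DIGIT_MAP = {
--     'O': '0', 'I': '1', 'L': '1', 'Z': '2',
--     'S': '5', 'G': '6', 'B': '8', 'A': '4',
--     'J': '7', 'T': '7', 'D': '0', 'Q': '0'
-- }
--
-- LETTER_MAP = {
--     '0': 'O', '1': 'I', '2': 'Z',
--     '5': 'S', '6': 'G', '8': 'B',
--     '4': 'A', '7': 'T'
-- }
--
-- PLATE_TEMPLATES = [
--     'LLDDLLDDDD',
--     'LLDDLDDDD',
--     'LLDDLLLDDDD',
--     'LLDDDDDD',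
--     'DDLLDDDDLL',
-- ]
--
--
-- def _pos_ok(expected, ch):
--     if expected == 'L':
--         return ch.isalpha() or ch in LETTER_MAP
--     if expected == 'D':
--         return ch.isdigit() or ch in DIGIT_MAP
--     return False
--
--
-- def _apply_positional_correction(text: str) -> str:
--     # Phase 1: score each length-matching template without building strings.
--     if not text:
--         return text
--     best_template = None
--     best_score = -1
--     for template in PLATE_TEMPLATES:
--         if len(template) != len(text):
--             continue
--         score = sum(1 for expected, ch in zip(template, text) if _pos_ok(expected, ch))
--         if score > best_score:
--             best_score = score
--             best_template = template
--     if best_template is None: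
--         return text
--     # Phase 2: correct only against the single winning template.
--     out = []
--     for expected, ch in zip(best_template, text):
--         if expected == 'L' and not ch.isalpha() and ch in LETTER_MAP:
--             out.append(LETTER_MAP[ch])
--         elif expected == 'D' and not ch.isdigit() and ch in DIGIT_MAP:
--             out.append(DIGIT_MAP[ch])
--         else:
--             out.append(ch)
--     return ''.join(out)
-- ===== Notes on version B (the rewrite author's own statement) =====
-- stated objective: alternative
-- what changed: A builds a corrected string while scoring every template in one fused loop; B first scores each length-matching template against the raw text (no string building), picks the winner with the same strict first-wins rule, and only then applies the positional maps to that single winning template in a separate pass.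
import Mathlib
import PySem

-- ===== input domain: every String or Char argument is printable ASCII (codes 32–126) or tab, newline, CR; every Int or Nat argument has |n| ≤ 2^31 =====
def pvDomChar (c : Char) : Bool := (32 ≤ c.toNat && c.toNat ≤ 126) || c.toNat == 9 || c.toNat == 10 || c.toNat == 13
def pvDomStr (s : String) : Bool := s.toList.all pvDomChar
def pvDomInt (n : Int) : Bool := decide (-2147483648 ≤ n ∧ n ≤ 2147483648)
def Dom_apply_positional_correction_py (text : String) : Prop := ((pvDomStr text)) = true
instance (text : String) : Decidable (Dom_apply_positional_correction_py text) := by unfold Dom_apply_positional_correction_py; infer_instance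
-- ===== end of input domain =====

-- B scores every length-matching template in a first pass (no string building) and corrects
-- the text against the single winning template in a second pass; same value as A, alternative decomposition.

-- Shared module-level constants (DIGIT_MAP, LETTER_MAP, PLATE_TEMPLATES of util.py)
def digitMap : PySem.Dict Char Char := PySem.Dict.ofList
  [('O','0'),('I','1'),('L','1'),('Z','2'),('S','5'),('G','6'),('B','8'),('A','4'),('J','7'),('T','7'),('D','0'),('Q','0')]
def letterMap : PySem.Dict Char Char := PySem.Dict.ofList
  [('0','O'),('1','I'),('2','Z'),('5','S'),('6','G'),('8','B'),('4','A'),('7','T')]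
def plateTemplates : List String :=
  ["LLDDLLDDDD","LLDDLDDDD","LLDDLLLDDDD","LLDDDDDD","DDLLDDDDLL"]

-- ===== PORT A =====
-- body of A's inner 'for i, expected in enumerate(template)' loop; state = (corrected, match_score).
-- i comes from enumerate, so 0 ≤ i < len(corrected): pyGetD and .toNat for 'corrected[i]' are exact here.
def innerStepA (st : List Char × Int) (p : Int × Char) : List Char × Int :=
  let corrected := st.1
  let score := st.2
  let i := p.1
  let expected := p.2
  let ch := PySem.List.pyGetD corrected i ' '
  if expected = 'L' then
    if PySem.Chars.isalpha ch then (corrected, score + 1)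
    else if letterMap.contains ch then
      (corrected.set i.toNat ((letterMap.get? ch).getD ch), score + 1)
    else (corrected, score)
  else if expected = 'D' then
    if PySem.Chars.isdigit ch then (corrected, score + 1)
    else if digitMap.contains ch then
      (corrected.set i.toNat ((digitMap.get? ch).getD ch), score + 1)
    else (corrected, score)
  else (corrected, score)

-- body of A's outer 'for template in PLATE_TEMPLATES' loop; state = (best_corrected, best_match_score)
def outerStepA (text : String) (st : String × Int) (template : String) : String × Int :=
  if PySem.Str.len template ≠ PySem.Str.len text then st
  else
    let r := (PySem.List.enumerate template.toList 0).foldl innerStepA (text.toList, 0)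
    if r.2 > st.2 then (String.ofList r.1, r.2) else st

def apply_positional_correction_py (text : String) : String :=
  if text = "" then text
  else (plateTemplates.foldl (outerStepA text) (text, -1)).1

-- ===== PORT B =====
-- _pos_ok(expected, ch) of Source B
def posOkB (expected ch : Char) : Bool :=
  if expected = 'L' then PySem.Chars.isalpha ch || letterMap.contains ch
  else if expected = 'D' then PySem.Chars.isdigit ch || digitMap.contains ch
  else false

-- one position of Source B's phase-2 correction loop
def fixB (p : Char × Char) : Char :=
  if p.1 = 'L' ∧ ¬PySem.Chars.isalpha p.2 ∧ letterMap.contains p.2 then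
    (letterMap.get? p.2).getD p.2
  else if p.1 = 'D' ∧ ¬PySem.Chars.isdigit p.2 ∧ digitMap.contains p.2 then
    (digitMap.get? p.2).getD p.2
  else p.2

-- phase-1 score: sum(1 for expected, ch in zip(template, text) if _pos_ok(expected, ch))
def scoreB (template text : String) : Int :=
  ((template.toList.zip text.toList).countP (fun p => posOkB p.1 p.2) : Int)

-- body of Source B's phase-1 loop; state = (best_template, best_score)
def outerStepB (text : String) (st : Option String × Int) (template : String) : Option String × Int :=
  if PySem.Str.len template ≠ PySem.Str.len text then st
  else if scoreB template text > st.2 then (some template, scoreB template text) else st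

def apply_positional_correction_py_alt (text : String) : String :=
  if text = "" then text
  else
    let best := plateTemplates.foldl (outerStepB text) (none, -1)
    match best.1 with
    | none => text
    | some t => String.ofList ((t.toList.zip text.toList).map fixB)

-- ===== PRECONDITION & SPEC =====
def Spec_apply_positional_correction_py (text : String) (out : String) : Prop := out = apply_positional_correction_py_alt text
instance (text : String) (out : String) : Decidable (Spec_apply_positional_correction_py text out) := by unfold Spec_apply_positional_correction_py; infer_instance

-- ===== CLAIM (what is proved, stated in full; the proofs are below) =====
def Claim_equal_apply_positional_correction_py : Prop := ∀ (text : String), Dom_apply_positional_correction_py text → Spec_apply_positional_correction_py text (apply_positional_correction_py text)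

-- ===== LEMMAS AND PROOFS =====

-- A's inner step at index k rewrites the list to 'set k (fixB …)' and adds posOkB to the score
lemma innerStepA_eq (l : List Char) (sc : Int) (k : Nat) (e : Char) (hk : k < l.length) :
    innerStepA (l, sc) ((k : Int), e)
      = (l.set k (fixB (e, l[k])), sc + (if posOkB e l[k] then 1 else 0)) := by
  have hget : PySem.List.pyGetD l ((k : Int)) ' ' = l[k] := by
    simp [PySem.List.pyGetD_natCast, List.getD_eq_getElem?_getD, List.getElem?_eq_getElem hk]
  simp only [innerStepA, fixB, posOkB, hget, Int.toNat_natCast]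
  split_ifs with h1 h2 h3 h4 h5 h6 h7 h8 h9 h10 h11 h12 h13 h14 <;>
    simp_all [List.set_getElem_self hk]

-- A's inner fold over enumerate(template) from index k = phase-2 correction + phase-1 score of B
lemma innerA_fold (ts : List Char) (k : Nat) (l : List Char) (sc : Int)
    (h : k + ts.length ≤ l.length) :
    (PySem.List.enumerate ts (k : Int)).foldl innerStepA (l, sc)
      = (l.take k ++ (ts.zip (l.drop k)).map fixB ++ l.drop (k + ts.length),
         sc + ((ts.zip (l.drop k)).countP (fun p => posOkB p.1 p.2) : Int)) := by
  induction ts generalizing k l sc with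
  | nil => simp [PySem.List.enumerate_nil]
  | cons e ts ih =>
    have hk : k < l.length := by simp at h; omega
    have hcast : (k : Int) + 1 = ((k + 1 : Nat) : Int) := by push_cast; ring
    rw [PySem.List.enumerate_cons, List.foldl_cons, innerStepA_eq l sc k e hk, hcast,
        ih (k + 1) (l.set k (fixB (e, l[k]))) _ (by simp; simp at h; omega)]
    have hdrop : l.drop k = l[k] :: l.drop (k + 1) := List.drop_eq_getElem_cons hk
    have hlen : (l.take k).length = k := by simp; omega
    have hd1 : (l.set k (fixB (e, l[k]))).drop (k + 1) = l.drop (k + 1) :=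
      List.drop_set_of_lt (by omega)
    have hd2 : (l.set k (fixB (e, l[k]))).drop (k + 1 + ts.length) = l.drop (k + 1 + ts.length) :=
      List.drop_set_of_lt (by omega)
    have ht1 : (l.set k (fixB (e, l[k]))).take (k + 1) = l.take k ++ [fixB (e, l[k])] := by
      rw [List.take_set, List.take_succ_eq_append_getElem hk, List.set_append]
      simp [hlen]
    simp only [Prod.mk.injEq]
    refine ⟨?_, ?_⟩
    · rw [hd1, hd2, ht1, hdrop, List.zip_cons_cons, List.map_cons,
          show k + 1 + ts.length = k + (e :: ts).length from by simp; omega]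
      simp [List.append_assoc]
    · rw [hd1, hdrop, List.zip_cons_cons, List.countP_cons]
      by_cases hb : posOkB e l[k] = true <;> simp [hb] <;> ring

def renderB (text : String) (bt : Option String) : String :=
  match bt with
  | none => text
  | some t => String.ofList ((t.toList.zip text.toList).map fixB)

-- one outer iteration: A's step on (rendered best, score) mirrors B's step on (best template, score)
lemma step_eq (text t : String) (bt : Option String) (bs : Int) :
    outerStepA text (renderB text bt, bs)  t
      = (renderB text (outerStepB text (bt, bs) t).1, (outerStepB text (bt, bs) t).2) := by
  unfold outerStepA outerStepB
  by_cases hne : PySem.Str.len t ≠ PySem.Str.len text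
  · rw [if_pos hne, if_pos hne]
  · rw [if_neg hne, if_neg hne]
    simp at hne
    have hl : t.toList.length = text.toList.length := by
      simp only [String.length_toList]; omega
    have hfold := innerA_fold t.toList 0 text.toList 0 (by omega)
    simp only [Nat.cast_zero, zero_add, List.take_zero, List.drop_zero, List.nil_append] at hfold
    rw [List.drop_eq_nil_of_le (by omega), List.append_nil] at hfold
    rw [hfold]
    simp only [scoreB, renderB]
    split_ifs <;> rfl

lemma outer_fold (tl : List String) (text : String) (bt : Option String) (bs : Int) :
    tl.foldl (outerStepA text) (renderB text bt, bs)
      = ((renderB text (tl.foldl (outerStepB text) (bt, bs)).1),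
         (tl.foldl (outerStepB text) (bt, bs)).2) := by
  induction tl generalizing bt bs with
  | nil => rfl
  | cons t tl ih =>
    rw [List.foldl_cons, List.foldl_cons, step_eq, ih]

-- ===== VERDICT (by name: the statement is the Claim_ definition above) =====
theorem apply_positional_correction_py_spec : Claim_equal_apply_positional_correction_py := by
  intro text _
  unfold Spec_apply_positional_correction_py
  unfold apply_positional_correction_py apply_positional_correction_py_alt
  by_cases h : text = ""
  · simp [h]
  · simp only [h, if_false]
    have := outer_fold plateTemplates text none (-1)
    simp only [renderB] at this
    rw [this]
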